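-- pv_equiv track=rewrite | github.com/SpacemanMeow/spacemanmeow.github.io | tools/md_to_html.py | convert_images_to_gallery
-- ===== SOURCE A (Python) =====
-- def convert_images_to_gallery(html_content):
--     """Convert consecutive images to gallery format"""
--     lines = html_content.split('\n')
--     new_lines = []
--     gallery_imgs = []
--
--     for line in lines:
--         if '<img' in line and 'class="gallery-img"' in line:
--             gallery_imgs.append(line.strip())
--         else:
--             if gallery_imgs:
--                 # Close gallery
--                 new_lines.append('<div class="image-gallery">')
--                 new_lines.extend(gallery_imgs)
--                 new_lines.append('</div>')
--                 gallery_imgs = []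
--             new_lines.append(line)
--
--     # Handle remaining images
--     if gallery_imgs:
--         new_lines.append('<div class="image-gallery">')
--         new_lines.extend(gallery_imgs)
--         new_lines.append('</div>')
--
--     return '\n'.join(new_lines)
-- ===== SOURCE B (Python) =====
-- def convert_images_to_gallery(html_content):
--     """Convert consecutive images to gallery format"""
--     lines = html_content.split('\n')
--
--     def is_gallery(line):
--         return '<img' in line and 'class="gallery-img"' in line
--
--     out = []
--     i = 0
--     n = len(lines)
--     while i < n:
--         k = is_gallery(lines[i])
--         j = i + 1
--         while j < n and is_gallery(lines[j]) == k:
--             j += 1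
--         if k:
--             out.append('<div class="image-gallery">')
--             out.extend(line.strip() for line in lines[i:j])
--             out.append('</div>')
--         else:
--             out.extend(lines[i:j])
--         i = j
--     return '\n'.join(out)
-- ===== Notes on version B (the rewrite author's own statement) =====
-- stated objective: alternative
-- what changed: Replaces A's accumulate-into-a-buffer-and-flush-on-boundary control flow with a run-grouping pass: an index scan finds each maximal run of lines with the same gallery-key and emits the whole block (wrapped and stripped, or verbatim) at once.
import Mathlib
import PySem

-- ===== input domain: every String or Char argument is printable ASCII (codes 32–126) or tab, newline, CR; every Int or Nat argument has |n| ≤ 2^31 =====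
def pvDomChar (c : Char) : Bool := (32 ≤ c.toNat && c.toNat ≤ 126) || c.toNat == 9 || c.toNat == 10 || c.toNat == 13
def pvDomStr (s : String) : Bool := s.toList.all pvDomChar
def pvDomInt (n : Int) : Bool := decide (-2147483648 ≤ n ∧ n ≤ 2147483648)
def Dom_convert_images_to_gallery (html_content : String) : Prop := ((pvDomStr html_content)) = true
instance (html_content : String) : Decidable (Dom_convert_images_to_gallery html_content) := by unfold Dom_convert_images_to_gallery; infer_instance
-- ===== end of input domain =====

-- B replaces A's buffer-accumulate-and-flush loop by a run-grouping pass (consecutive lines with the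
-- same gallery-key are handled as one block); alternative decomposition, same cost.

-- ===== PORT A =====
-- the gallery test shared by both Pythons: '<img' in line and 'class="gallery-img"' in line
def pvKey (line : String) : Bool :=
  PySem.Str.isIn "<img" line && PySem.Str.isIn "class=\"gallery-img\"" line

-- one iteration of A's for-loop over state (new_lines, gallery_imgs)
def pvStepA (st : List String × List String) (line : String) : List String × List String :=
  if pvKey line then
    (st.1, st.2 ++ [PySem.Str.strip line])
  else
    ((if st.2 ≠ [] then st.1 ++ "<div class=\"image-gallery\">" :: st.2 ++ ["</div>"] else st.1)
      ++ [line], [])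

-- A's trailing "handle remaining images" flush
def pvFinA (st : List String × List String) : List String :=
  if st.2 ≠ [] then st.1 ++ "<div class=\"image-gallery\">" :: st.2 ++ ["</div>"] else st.1

def convert_images_to_gallery (html_content : String) : String :=
  PySem.Str.join "\n"
    (pvFinA (((PySem.Str.split? html_content "\n").getD []).foldl pvStepA ([], [])))

-- ===== PORT B =====
-- B's outer while-loop: take the maximal run of lines with the same key, emit its block, continue
def pvRunsB : List String → List String
  | [] => []
  | l :: ls =>
    (if pvKey l then
        "<div class=\"image-gallery\">" ::
          (l :: ls.takeWhile (fun x => pvKey x == pvKey l)).map PySem.Str.strip ++ ["</div>"]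
      else
        l :: ls.takeWhile (fun x => pvKey x == pvKey l))
    ++ pvRunsB (ls.dropWhile (fun x => pvKey x == pvKey l))
termination_by l => l.length
decreasing_by
  simp only [List.length_cons]
  exact Nat.lt_succ_of_le (ls.length_dropWhile_le _)

def convert_images_to_gallery_alt (html_content : String) : String :=
  PySem.Str.join "\n" (pvRunsB ((PySem.Str.split? html_content "\n").getD []))

-- ===== PRECONDITION & SPEC =====
def Spec_convert_images_to_gallery (html_content : String) (out : String) : Prop := out = convert_images_to_gallery_alt html_content
instance (html_content : String) (out : String) : Decidable (Spec_convert_images_to_gallery html_content out) := by unfold Spec_convert_images_to_gallery; infer_instance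

-- ===== CLAIM (what is proved, stated in full; the proofs are below) =====
def Claim_equal_convert_images_to_gallery : Prop := ∀ (html_content : String), Dom_convert_images_to_gallery html_content → Spec_convert_images_to_gallery html_content (convert_images_to_gallery html_content)

-- ===== LEMMAS AND PROOFS =====

-- the first element surviving dropWhile falsifies the predicate
theorem pvHeadDropFalse {α : Type} {p : α → Bool} {l : List α} {r : α} {rs : List α}
    (h : l.dropWhile p = r :: rs) : p r = false := by
  induction l with
  | nil => simp at h
  | cons a l ih =>
    rw [List.dropWhile_cons] at h
    by_cases hp : p a = true
    · simp [hp] at h; exact ih h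
    · simp [hp] at h
      rw [← h.1]
      simpa using hp

-- A's loop over a run of non-gallery lines just appends them, leaving the buffer empty
theorem pvRunFalse (run : List String) (h : ∀ x ∈ run, pvKey x = false) :
    ∀ (rest nl : List String),
      (run ++ rest).foldl pvStepA (nl, []) = rest.foldl pvStepA (nl ++ run, []) := by
  induction run with
  | nil => intro rest nl; simp
  | cons a t ih =>
    intro rest nl
    have ha : pvKey a = false := h a (by simp)
    simp only [List.cons_append, List.foldl_cons]
    rw [show pvStepA (nl, []) a = (nl ++ [a], []) by simp [pvStepA, ha]]
    rw [ih (fun x hx => h x (by simp [hx])) rest (nl ++ [a])]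
    simp

-- A's loop over a run of gallery lines accumulates their stripped forms in the buffer
theorem pvRunTrue (run : List String) (h : ∀ x ∈ run, pvKey x = true) :
    ∀ (rest nl g : List String),
      (run ++ rest).foldl pvStepA (nl, g)
        = rest.foldl pvStepA (nl, g ++ run.map PySem.Str.strip) := by
  induction run with
  | nil => intro rest nl g; simp
  | cons a t ih =>
    intro rest nl g
    have ha : pvKey a = true := h a (by simp)
    simp only [List.cons_append, List.foldl_cons]
    rw [show pvStepA (nl, g) a = (nl, g ++ [PySem.Str.strip a]) by simp [pvStepA, ha]]
    rw [ih (fun x hx => h x (by simp [hx])) rest nl (g ++ [PySem.Str.strip a])]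
    simp

-- a non-empty buffer may be flushed eagerly when the next line (if any) is not a gallery line
theorem pvSkipFlush (d nl m : List String) (hm : m ≠ [])
    (hd : d = [] ∨ ∃ r rs, d = r :: rs ∧ pvKey r = false) :
    pvFinA (d.foldl pvStepA (nl, m))
      = pvFinA (d.foldl pvStepA (nl ++ "<div class=\"image-gallery\">" :: m ++ ["</div>"], [])) := by
  rcases hd with h | ⟨r, rs, rfl, hr⟩
  · subst h; simp [pvFinA, hm]
  · simp only [List.foldl_cons]
    rw [show pvStepA (nl, m) r
          = ((nl ++ "<div class=\"image-gallery\">" :: m ++ ["</div>"]) ++ [r], []) by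
        simp [pvStepA, hr, hm]]
    rw [show pvStepA (nl ++ "<div class=\"image-gallery\">" :: m ++ ["</div>"], []) r
          = ((nl ++ "<div class=\"image-gallery\">" :: m ++ ["</div>"]) ++ [r], []) by
        simp [pvStepA, hr]]

-- the heart of the equivalence: A's flushed loop equals B's run decomposition
theorem pvMain (lines : List String) :
    ∀ nl : List String, pvFinA (lines.foldl pvStepA (nl, [])) = nl ++ pvRunsB lines := by
  induction lines using pvRunsB.induct with
  | case1 => intro nl; simp [pvFinA, pvRunsB]
  | case2 l ls ih =>
    intro nl
    by_cases hk : pvKey l = true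
    · have hall : ∀ x ∈ l :: ls.takeWhile (fun x => pvKey x == pvKey l), pvKey x = true := by
        intro x hx
        rcases List.mem_cons.mp hx with rfl | hx'
        · exact hk
        · have := List.mem_takeWhile_imp hx'
          simpa [hk] using this
      have hOr : ls.dropWhile (fun x => pvKey x == pvKey l) = []
          ∨ ∃ r rs, ls.dropWhile (fun x => pvKey x == pvKey l) = r :: rs ∧ pvKey r = false := by
        cases hdw : ls.dropWhile (fun x => pvKey x == pvKey l) with
        | nil => exact Or.inl rfl
        | cons r rs =>
          refine Or.inr ⟨r, rs, rfl, ?_⟩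
          have := pvHeadDropFalse hdw
          simpa [hk] using this
      calc pvFinA ((l :: ls).foldl pvStepA (nl, []))
          = pvFinA (((l :: ls.takeWhile (fun x => pvKey x == pvKey l))
              ++ ls.dropWhile (fun x => pvKey x == pvKey l)).foldl pvStepA (nl, [])) := by
            simp
        _ = pvFinA ((ls.dropWhile (fun x => pvKey x == pvKey l)).foldl pvStepA
              (nl, [] ++ (l :: ls.takeWhile (fun x => pvKey x == pvKey l)).map PySem.Str.strip)) := by
            rw [pvRunTrue _ hall]
        _ = pvFinA ((ls.dropWhile (fun x => pvKey x == pvKey l)).foldl pvStepA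
              (nl ++ "<div class=\"image-gallery\">"
                :: (l :: ls.takeWhile (fun x => pvKey x == pvKey l)).map PySem.Str.strip
                ++ ["</div>"], [])) := by
            rw [List.nil_append]
            exact pvSkipFlush _ _ _ (by simp) hOr
        _ = (nl ++ "<div class=\"image-gallery\">"
                :: (l :: ls.takeWhile (fun x => pvKey x == pvKey l)).map PySem.Str.strip
                ++ ["</div>"]) ++ pvRunsB (ls.dropWhile (fun x => pvKey x == pvKey l)) := ih _
        _ = nl ++ pvRunsB (l :: ls) := by
            rw [pvRunsB]
            simp [hk]
    · have hk' : pvKey l = false := by simpa using hk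
      have hall : ∀ x ∈ l :: ls.takeWhile (fun x => pvKey x == pvKey l), pvKey x = false := by
        intro x hx
        rcases List.mem_cons.mp hx with rfl | hx'
        · exact hk'
        · have := List.mem_takeWhile_imp hx'
          simpa [hk'] using this
      calc pvFinA ((l :: ls).foldl pvStepA (nl, []))
          = pvFinA (((l :: ls.takeWhile (fun x => pvKey x == pvKey l))
              ++ ls.dropWhile (fun x => pvKey x == pvKey l)).foldl pvStepA (nl, [])) := by
            simp
        _ = pvFinA ((ls.dropWhile (fun x => pvKey x == pvKey l)).foldl pvStepA
              (nl ++ (l :: ls.takeWhile (fun x => pvKey x == pvKey l)), [])) := by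
            rw [pvRunFalse _ hall]
        _ = (nl ++ (l :: ls.takeWhile (fun x => pvKey x == pvKey l)))
              ++ pvRunsB (ls.dropWhile (fun x => pvKey x == pvKey l)) := ih _
        _ = nl ++ pvRunsB (l :: ls) := by
            rw [pvRunsB]
            simp [hk']

-- ===== VERDICT (by name: the statement is the Claim_ definition above) =====
theorem convert_images_to_gallery_spec : Claim_equal_convert_images_to_gallery := by
  intro html_content _
  unfold Spec_convert_images_to_gallery convert_images_to_gallery convert_images_to_gallery_alt
  rw [pvMain]
  simp
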